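-- pv_equiv track=rewrite | github.com/hutuswatermelon/NT101.Q13 | playfair.py | build_char_mapping
-- ===== SOURCE A (Python) =====
-- from typing import Dict, List, Tuple, Optional
--
-- def build_char_mapping(original: str, processed: str, matrix_size: int = 5) -> Dict[int, int]:
--     """
--     Build mapping from original text positions to processed text positions.
--
--     Args:
--         original: Original text with all characters
--         processed: Processed text (after preprocess_text)
--         matrix_size: Size of matrix
--
--     Returns:
--         Dictionary mapping original_pos -> processed_pos for valid characters
--     """
--     mapping = {}
--     processed_idx = 0
--
--     for orig_idx, char in enumerate(original):
--         # Check if character is valid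
--         is_valid = False
--         if matrix_size == 5:
--             is_valid = char.isalpha()
--         elif matrix_size == 6:
--             is_valid = char.isalnum()
--
--         if is_valid:
--             if processed_idx < len(processed):
--                 mapping[orig_idx] = processed_idx
--                 processed_idx += 1
--
--     return mapping
-- ===== SOURCE B (Python) =====
-- def build_char_mapping(original: str, processed: str, matrix_size: int = 5):
--     # Rank-table approach: precompute for each position its rank among valid
--     # characters (prefix count), then keep the positions whose rank fits under
--     # len(processed). No running dict/index state is threaded through the scan.
--     if matrix_size == 5:
--         ok = str.isalpha
--     elif matrix_size == 6:
--         ok = str.isalnum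
--     else:
--         ok = lambda c: False
--     rank = []
--     total = 0
--     for c in original:
--         rank.append(total)
--         total += 1 if ok(c) else 0
--     cap = len(processed)
--     return {i: r for i, (c, r) in enumerate(zip(original, rank))
--             if ok(c) and r < cap}
-- ===== Notes on version B (the rewrite author's own statement) =====
-- stated objective: alternative
-- what changed: Replaces A's stateful scan (dict plus running processed-index with an in-loop cap guard) by a rank-table decomposition: first precompute each position's rank among valid characters as a prefix-count table, then select the positions whose character is valid and whose rank is below len(processed) in a filtered comprehension.
import Mathlib
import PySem

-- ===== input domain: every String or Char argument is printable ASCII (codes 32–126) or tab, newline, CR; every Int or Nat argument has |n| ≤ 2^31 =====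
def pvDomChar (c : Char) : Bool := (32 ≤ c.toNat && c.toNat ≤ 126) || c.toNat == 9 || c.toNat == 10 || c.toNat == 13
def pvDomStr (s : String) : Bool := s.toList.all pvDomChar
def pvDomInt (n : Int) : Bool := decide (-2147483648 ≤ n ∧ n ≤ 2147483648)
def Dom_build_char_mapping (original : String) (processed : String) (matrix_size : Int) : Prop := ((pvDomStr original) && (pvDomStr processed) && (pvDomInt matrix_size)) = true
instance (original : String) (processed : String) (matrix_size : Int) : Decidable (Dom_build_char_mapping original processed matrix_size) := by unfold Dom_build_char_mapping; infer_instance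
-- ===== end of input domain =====

-- B replaces A's stateful scan (dict + running index) by a precomputed rank table
-- (prefix counts of valid characters) and a filtered comprehension; same cost, alternative decomposition.

-- ===== PORT A =====
-- A: loop over enumerate(original) with a dict and a running processed index.
def build_char_mapping (original : String) (processed : String) (matrix_size : Int) : List (Int × Int) :=
  let step : PySem.Dict Int Int × Int → Int × Char → PySem.Dict Int Int × Int :=
    fun st p =>
      let is_valid : Bool :=
        if matrix_size = 5 then PySem.Chars.isalpha p.2
        else if matrix_size = 6 then PySem.Chars.isalnum p.2
        else false
      if is_valid then
        if st.2 < PySem.Str.len processed then (st.1.insert p.1 st.2, st.2 + 1)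
        else st
      else st
  ((PySem.List.enumerate original.toList 0).foldl step (PySem.Dict.empty, 0)).1.items

-- ===== PORT B =====
-- B: build the rank table (prefix counts of valid chars), then a filtered comprehension.
def bcm_ok (matrix_size : Int) (c : Char) : Bool :=
  if matrix_size = 5 then PySem.Chars.isalpha c
  else if matrix_size = 6 then PySem.Chars.isalnum c
  else false

def build_char_mapping_alt (original : String) (processed : String) (matrix_size : Int) : List (Int × Int) :=
  -- rank[i] = number of valid characters before position i (the loop appending `total`)
  let rank : List Int :=
    (original.toList.foldl
      (fun st c => (st.1 ++ [st.2], st.2 + (if bcm_ok matrix_size c then 1 else 0)))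
      (([] : List Int), (0 : Int))).1
  let cap : Int := PySem.Str.len processed
  -- {i: r for i, (c, r) in enumerate(zip(original, rank)) if ok(c) and r < cap}
  ((PySem.List.enumerate (original.toList.zip rank) 0).filter
      (fun q => bcm_ok matrix_size q.2.1 && decide (q.2.2 < cap))).map
    (fun q => (q.1, q.2.2))

-- ===== PRECONDITION & SPEC =====
def Spec_build_char_mapping (original : String) (processed : String) (matrix_size : Int) (out : List (Int × Int)) : Prop := out = build_char_mapping_alt original processed matrix_size
instance (original : String) (processed : String) (matrix_size : Int) (out : List (Int × Int)) : Decidable (Spec_build_char_mapping original processed matrix_size out) := by unfold Spec_build_char_mapping; infer_instance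

-- ===== CLAIM (what is proved, stated in full; the proofs are below) =====
def Claim_equal_build_char_mapping : Prop := ∀ (original : String) (processed : String) (matrix_size : Int), Dom_build_char_mapping original processed matrix_size → Spec_build_char_mapping original processed matrix_size (build_char_mapping original processed matrix_size)

-- ===== LEMMAS AND PROOFS =====

-- the rank table B's loop builds, as a structural function (proof-only helper)
def bcm_pref (ms : Int) (j : Int) : List Char → List Int
  | [] => []
  | c :: cs => j :: bcm_pref ms (j + (if bcm_ok ms c then 1 else 0)) cs

theorem bcm_pref_fold (ms : Int) (cs : List Char) (acc : List Int) (j : Int) :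
    (cs.foldl (fun st c => (st.1 ++ [st.2], st.2 + (if bcm_ok ms c then 1 else 0))) (acc, j)).1
      = acc ++ bcm_pref ms j cs := by
  induction cs generalizing acc j with
  | nil => simp [bcm_pref]
  | cons c cs ih => simp [bcm_pref, ih]

theorem bcm_pref_ge (ms : Int) (L : Int) (cs : List Char) (k j : Int) (h : L ≤ j) :
    ((PySem.List.enumerate (cs.zip (bcm_pref ms j cs)) k).filter
        (fun q => bcm_ok ms q.2.1 && decide (q.2.2 < L))).map (fun q => (q.1, q.2.2)) = [] := by
  induction cs generalizing k j with
  | nil => simp [bcm_pref]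
  | cons c cs ih =>
    simp only [bcm_pref, List.zip_cons_cons, PySem.List.enumerate_cons, List.filter_cons]
    rw [if_neg (by simp; omega)]
    exact ih (k + 1) _ (by omega)

theorem bcm_alt_loop (ms : Int) (L : Int) (cs : List Char) (k j : Int) :
    ((PySem.List.enumerate (cs.zip (bcm_pref ms j cs)) k).filter
        (fun q => bcm_ok ms q.2.1 && decide (q.2.2 < L))).map (fun q => (q.1, q.2.2))
      = (((PySem.List.enumerate cs k).filter (fun p => bcm_ok ms p.2)).map (·.1)).zip
          (PySem.List.pyRange j L 1) := by
  induction cs generalizing k j with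
  | nil => simp [bcm_pref]
  | cons c cs ih =>
    simp only [bcm_pref, List.zip_cons_cons, PySem.List.enumerate_cons, List.filter_cons]
    by_cases hv : bcm_ok ms c = true
    · by_cases hj : j < L
      · rw [if_pos (by simp [hv, hj]), PySem.List.pyRange_one_cons hj]
        simp [hv, ih (k + 1) (j + 1)]
      · rw [if_neg (by simp [hj]), if_pos (by simpa using hv)]
        rw [PySem.List.pyRange_one_eq_nil (by omega), List.zip_nil_right]
        exact bcm_pref_ge ms L cs (k + 1) _ (by omega)
    · rw [if_neg (by simp [hv]), if_neg (by simpa using hv)]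
      simp only [hv, Bool.false_eq_true, if_false, add_zero]
      exact ih (k + 1) j
    
theorem bcm_loop (matrix_size : Int) (L : Int) (ps : List (Int × Char))
    (d : PySem.Dict Int Int) (j : Int)
    (hfresh : ∀ p ∈ ps, d.contains p.1 = false)
    (hnodup : (ps.map (·.1)).Nodup) :
    ((ps.foldl (fun st p =>
        let is_valid : Bool :=
          if matrix_size = 5 then PySem.Chars.isalpha p.2
          else if matrix_size = 6 then PySem.Chars.isalnum p.2
          else false
        if is_valid then
          if st.2 < L then (st.1.insert p.1 st.2, st.2 + 1) else st
        else st) (d, j)).1).items =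
      d.items ++ ((ps.filter (fun p => bcm_ok matrix_size p.2)).map (·.1)).zip
        (PySem.List.pyRange j L 1) := by
  induction ps generalizing d j with
  | nil => simp
  | cons p rest ih =>
    simp only [List.foldl_cons, List.filter_cons]
    have hok : (if matrix_size = 5 then PySem.Chars.isalpha p.2
        else if matrix_size = 6 then PySem.Chars.isalnum p.2 else false) = bcm_ok matrix_size p.2 := rfl
    rw [hok]
    simp only [List.map_cons] at hnodup ⊢
    by_cases hv : bcm_ok matrix_size p.2 = true
    · simp only [hv, if_true]
      by_cases hj : j < L
      · simp only [if_pos hj]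
        rw [ih (d.insert p.1 j) (j + 1) ?_ (List.Nodup.of_cons hnodup)]
        · rw [PySem.Dict.items_insert, if_neg (by simp [hfresh p (List.mem_cons_self ..)])]
          rw [PySem.List.pyRange_one_cons hj]
          simp [List.zip]
        · intro q hq
          rw [PySem.Dict.contains_insert]
          have h1 : q.1 ≠ p.1 := by
            intro h
            have := (List.nodup_cons.mp hnodup).1
            exact this (h ▸ List.mem_map_of_mem hq)
          simp [h1, hfresh q (List.mem_cons_of_mem _ hq)]
      · simp only [if_neg hj]
        rw [ih d j (fun q hq => hfresh q (List.mem_cons_of_mem _ hq)) (List.Nodup.of_cons hnodup)]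
        rw [PySem.List.pyRange_one_eq_nil (by omega)]
        simp
    · simp only [hv, Bool.false_eq_true, if_false]
      exact ih d j (fun q hq => hfresh q (List.mem_cons_of_mem _ hq)) (List.Nodup.of_cons hnodup)

-- ===== VERDICT (by name: the statement is the Claim_ definition above) =====
theorem build_char_mapping_spec : Claim_equal_build_char_mapping := by
  intro original processed matrix_size _
  show build_char_mapping original processed matrix_size = build_char_mapping_alt original processed matrix_size
  unfold build_char_mapping build_char_mapping_alt
  simp only [bcm_pref_fold, List.nil_append, bcm_alt_loop]
  rw [bcm_loop]
  · simp [PySem.Dict.empty]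
  · intro p _; rfl
  · have := PySem.List.map_fst_enumerate original.toList (0 : Int)
    rw [this]
    exact PySem.List.nodup_pyRange_one _ _
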